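-- pv_equiv track=rewrite | github.com/thuhaung/thesis_report_management_system | format_check/processor.py | check_section_titles
-- ===== SOURCE A (Python) =====
-- def check_section_titles(section_titles, bold_medium_words):
--     formatted_section_titles = []
--     unformatted_section_titles = []
--
--     for page in bold_medium_words:
--         for i in range(len(page)):
--             title = page[i]
--             for j in range(i + 1, len(page)):
--                 title += " " + page[j]
--
--                 if title in section_titles:
--                     formatted_section_titles.append(title)
--                     i = j + 1
--                     break
--
--     for title in section_titles:
--         if title not in formatted_section_titles:
--             unformatted_section_titles.append(title)
--
--     return (formatted_section_titles, unformatted_section_titles)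
-- ===== SOURCE B (Python) =====
-- def check_section_titles(section_titles, bold_medium_words):
--     # Trie-as-prefix-set: a multi-word candidate can only grow into a known
--     # title while it is a prefix of one, so each start position's scan stops
--     # at the first non-prefix instead of running to the end of the page.
--     title_set = set(section_titles)
--     prefixes = set()
--     for t in section_titles:
--         for k in range(len(t) + 1):
--             prefixes.add(t[:k])
--
--     formatted_section_titles = []
--     for page in bold_medium_words:
--         for i, word in enumerate(page):
--             if word not in prefixes:
--                 continue
--             buf = word
--             for w in page[i + 1:]:
--                 buf += " " + w
--                 if buf in title_set:
--                     formatted_section_titles.append(buf)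
--                     break
--                 if buf not in prefixes:
--                     break
--
--     formatted_set = set(formatted_section_titles)
--     unformatted_section_titles = [t for t in section_titles if t not in formatted_set]
--     return (formatted_section_titles, unformatted_section_titles)
-- ===== Notes on version B (the rewrite author's own statement) =====
-- stated objective: faster
-- what changed: B precomputes a set of all title prefixes (a flattened trie) plus a title set, so each start position's scan stops at the first candidate that is no longer a prefix of any title, and the unformatted pass checks membership in a set of matches instead of rescanning the formatted list.
import Mathlib
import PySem

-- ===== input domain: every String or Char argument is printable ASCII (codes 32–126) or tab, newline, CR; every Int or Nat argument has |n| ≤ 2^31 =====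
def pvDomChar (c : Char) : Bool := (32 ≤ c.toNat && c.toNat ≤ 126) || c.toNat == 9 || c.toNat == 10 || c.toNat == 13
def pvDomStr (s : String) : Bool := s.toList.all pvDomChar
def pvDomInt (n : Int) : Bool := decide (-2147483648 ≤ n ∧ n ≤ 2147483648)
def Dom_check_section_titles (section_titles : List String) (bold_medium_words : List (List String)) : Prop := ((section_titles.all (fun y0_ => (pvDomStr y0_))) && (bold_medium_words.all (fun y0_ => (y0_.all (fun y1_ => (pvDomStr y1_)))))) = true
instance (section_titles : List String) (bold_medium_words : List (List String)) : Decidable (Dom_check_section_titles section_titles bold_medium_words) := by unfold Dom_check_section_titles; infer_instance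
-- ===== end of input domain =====

-- B replaces A's nested rescans by a precomputed set of all title prefixes (a
-- flattened trie) and a title set, so each start's scan stops at the first
-- non-prefix candidate; measured faster on large inputs.


-- ===== PORT A =====
-- A's inner `for j in range(i+1, len(page)): title += " " + page[j]; if title in …: break`
-- (the rebinding `i = j+1` in A is dead: it does not affect the range iterator)
def scanA (section_titles : List String) (page : List String) (stop j : Nat)
    (title : String) : Option String :=
  if _h : j < stop then
    let title' := title ++ " " ++ page.getD j ""   -- index j is in range here
    if title' ∈ section_titles then some title'
    else scanA section_titles page stop (j + 1) title'
  else none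
termination_by stop - j

def check_section_titles (section_titles : List String) (bold_medium_words : List (List String)) : List String × List String :=
  let formatted := bold_medium_words.foldl (fun acc page =>
    (List.range page.length).foldl (fun acc i =>
      match scanA section_titles page page.length (i + 1) (page.getD i "") with
      | some t => acc ++ [t]
      | none => acc) acc) []
  let unformatted := section_titles.foldl (fun acc t =>
    if t ∈ formatted then acc else acc ++ [t]) []
  (formatted, unformatted)

-- ===== PORT B =====
-- prefixes = { t[:k] for t in section_titles for k in range(len(t)+1) }
def buildPrefixes (section_titles : List String) : PySem.Set String :=
  section_titles.foldl (fun s t =>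
    (PySem.List.pyRange 0 (PySem.Str.len t + 1)).foldl
      (fun s k => s.add (PySem.Str.slice t none (some k))) s)
    PySem.Set.empty

-- `buf += " " + w; if buf in title_set: … break; if buf not in prefixes: break`
def walkB (titleSet prefixes : PySem.Set String) (buf : String) : List String → Option String
  | [] => none
  | w :: rest =>
    let buf' := buf ++ " " ++ w
    if buf' ∈ titleSet then some buf'
    else if buf' ∈ prefixes then walkB titleSet prefixes buf' rest
    else none

-- `for i, word in enumerate(page): if word not in prefixes: continue; …` (rest = page[i+1:])
def pageScanB (titleSet prefixes : PySem.Set String) : List String → List String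
  | [] => []
  | w :: rest =>
    (if w ∈ prefixes then
      match walkB titleSet prefixes w rest with
      | some t => [t]
      | none => []
     else []) ++ pageScanB titleSet prefixes rest

def check_section_titles_alt (section_titles : List String) (bold_medium_words : List (List String)) : List String × List String :=
  let titleSet := PySem.Set.ofList section_titles
  let prefixes := buildPrefixes section_titles
  let formatted := bold_medium_words.foldl (fun acc page =>
    acc ++ pageScanB titleSet prefixes page) []
  let fset := PySem.Set.ofList formatted
  let unformatted := section_titles.filter (fun t => !(decide (t ∈ fset)))
  (formatted, unformatted)

-- ===== PRECONDITION & SPEC =====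
def Spec_check_section_titles (section_titles : List String) (bold_medium_words : List (List String)) (out : List String × List String) : Prop := out = check_section_titles_alt section_titles bold_medium_words
instance (section_titles : List String) (bold_medium_words : List (List String)) (out : List String × List String) : Decidable (Spec_check_section_titles section_titles bold_medium_words out) := by unfold Spec_check_section_titles; infer_instance

-- ===== CLAIM (what is proved, stated in full; the proofs are below) =====
def Claim_equal_check_section_titles : Prop := ∀ (section_titles : List String) (bold_medium_words : List (List String)), Dom_check_section_titles section_titles bold_medium_words → Spec_check_section_titles section_titles bold_medium_words (check_section_titles section_titles bold_medium_words)

-- ===== LEMMAS AND PROOFS =====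

-- list-shaped version of A's index loop (proof vehicle only)
def scanL (section_titles : List String) (title : String) : List String → Option String
  | [] => none
  | w :: rest =>
    let title' := title ++ " " ++ w
    if title' ∈ section_titles then some title'
    else scanL section_titles title' rest

lemma scanA_eq_scanL (st : List String) (page : List String) :
    ∀ j title, scanA st page page.length j title = scanL st title (page.drop j) := by
  intro j
  induction' hn : page.length - j with n ih generalizing j
  · intro title
    have hj : page.length ≤ j := by omega
    rw [scanA, List.drop_eq_nil_of_le hj]
    simp [scanL, Nat.not_lt_of_le hj]
  · intro title
    have hj : j < page.length := by omega
    rw [scanA]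
    rw [List.drop_eq_getElem_cons hj]
    simp only [hj, dif_pos, scanL, List.getD_eq_getElem?_getD, List.getElem?_eq_getElem hj,
      Option.getD_some]
    split
    · rfl
    · exact ih (j + 1) (by omega) _

lemma mem_foldl_add {α : Type} [BEq α] [LawfulBEq α] (f : Int → α) (ks : List Int) :
    ∀ (s : PySem.Set α) (x : α),
      x ∈ ks.foldl (fun s k => s.add (f k)) s ↔ x ∈ s ∨ ∃ k ∈ ks, x = f k := by
  induction ks with
  | nil => simp
  | cons k ks ih =>
    intro s x
    simp [List.foldl_cons, ih, PySem.Set.mem_add]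
    tauto

lemma slicePrefix (t x : String) :
    (∃ k ∈ PySem.List.pyRange 0 (PySem.Str.len t + 1),
        x = PySem.Str.slice t none (some k)) ↔ x.toList <+: t.toList := by
  constructor
  · rintro ⟨k, hk, rfl⟩
    rw [PySem.List.mem_pyRange_one] at hk
    rw [PySem.Str.toList_slice, PySem.Chars.slice_eq_listSlice,
      PySem.List.slice_to _ hk.1]
    exact List.take_prefix _ _
  · intro h
    refine ⟨(x.toList.length : Int), ?_, ?_⟩
    · rw [PySem.List.mem_pyRange_one, PySem.Str.len_eq]
      have := h.length_le
      omega
    · apply String.toList_inj.mp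
      rw [PySem.Str.toList_slice, PySem.Chars.slice_eq_listSlice,
        PySem.List.slice_to _ (by positivity)]
      simpa using List.prefix_iff_eq_take.mp h

lemma mem_buildPrefixes (st : List String) (x : String) :
    x ∈ buildPrefixes st ↔ ∃ t ∈ st, x.toList <+: t.toList := by
  have H : ∀ (l : List String) (s0 : PySem.Set String),
      x ∈ l.foldl (fun s t =>
          (PySem.List.pyRange 0 (PySem.Str.len t + 1)).foldl
            (fun s k => s.add (PySem.Str.slice t none (some k))) s) s0 ↔
        x ∈ s0 ∨ ∃ t ∈ l, x.toList <+: t.toList := by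
    intro l
    induction l with
    | nil => simp
    | cons t l ih =>
      intro s0
      rw [List.foldl_cons, ih, mem_foldl_add, slicePrefix]
      simp only [List.mem_cons]
      constructor
      · rintro ((h | h) | h)
        · exact Or.inl h
        · exact Or.inr ⟨t, Or.inl rfl, h⟩
        · obtain ⟨u, hu, hp⟩ := h
          exact Or.inr ⟨u, Or.inr hu, hp⟩
      · rintro (h | ⟨u, (rfl | hu), hp⟩)
        · exact Or.inl (Or.inl h)
        · exact Or.inl (Or.inr hp)
        · exact Or.inr ⟨u, hu, hp⟩
  rw [buildPrefixes, H]
  simp [PySem.Set.empty_eq]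

lemma scanL_dead (st : List String) :
    ∀ (rest : List String) (buf : String),
      (∀ t ∈ st, ¬ buf.toList <+: t.toList) → scanL st buf rest = none := by
  intro rest
  induction rest with
  | nil => intro buf _; rfl
  | cons w rest ih =>
    intro buf h
    have hpre : buf.toList <+: (buf ++ " " ++ w).toList := by
      simp only [String.toList_append, List.append_assoc]
      exact List.prefix_append _ _
    have h' : ∀ t ∈ st, ¬ (buf ++ " " ++ w).toList <+: t.toList := by
      intro t ht hc
      exact h t ht (hpre.trans hc)
    rw [scanL]
    simp only [if_neg (fun hmem => h _ hmem hpre)]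
    exact ih _ h' 

lemma scanL_eq_walkB (st : List String) :
    ∀ (rest : List String) (buf : String),
      scanL st buf rest = walkB (PySem.Set.ofList st) (buildPrefixes st) buf rest := by
  intro rest
  induction rest with
  | nil => intro buf; rfl
  | cons w rest ih =>
    intro buf
    rw [scanL, walkB]
    simp only [PySem.Set.mem_ofList]
    split
    · rfl
    · rename_i hnt
      by_cases hp : (buf ++ " " ++ w) ∈ buildPrefixes st
      · rw [if_pos hp]
        exact ih _
      · rw [if_neg hp]
        rw [mem_buildPrefixes] at hp
        push Not at hp
        exact scanL_dead st rest _ hp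

lemma pageScanB_eq (st : List String) (page : List String) :
    (List.range page.length).flatMap
        (fun i => (scanL st (page.getD i "") (page.drop (i + 1))).toList)
      = pageScanB (PySem.Set.ofList st) (buildPrefixes st) page := by
  induction page with
  | nil => rfl
  | cons w rest ih =>
    rw [List.length_cons, List.range_succ_eq_map, List.flatMap_cons, List.flatMap_map]
    have htail : (List.range rest.length).flatMap
        (fun i => (scanL st ((w :: rest).getD (Nat.succ i) "")
          ((w :: rest).drop (Nat.succ i + 1))).toList)
        = pageScanB (PySem.Set.ofList st) (buildPrefixes st) rest := by
      rw [← ih]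
      simp
    rw [pageScanB, ← htail]
    congr 1
    by_cases hp : w ∈ buildPrefixes st
    · rw [if_pos hp, ← scanL_eq_walkB]
      simp only [List.getD_cons_zero, List.drop_succ_cons, List.drop_zero]
      cases scanL st w rest <;> rfl
    · rw [if_neg hp]
      rw [mem_buildPrefixes] at hp
      push Not at hp
      simp only [List.getD_cons_zero, List.drop_succ_cons, List.drop_zero]
      rw [scanL_dead st rest w hp]
      rfl

-- ===== VERDICT (by name: the statement is the Claim_ definition above) =====
lemma formatted_eq (st : List String) (bmw : List (List String)) :
    bmw.foldl (fun acc page =>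
      (List.range page.length).foldl (fun acc i =>
        match scanA st page page.length (i + 1) (page.getD i "") with
        | some t => acc ++ [t]
        | none => acc) acc) []
    = bmw.foldl (fun acc page =>
        acc ++ pageScanB (PySem.Set.ofList st) (buildPrefixes st) page) [] := by
  have hstep : (fun (acc : List String) (page : List String) =>
      (List.range page.length).foldl (fun acc i =>
        match scanA st page page.length (i + 1) (page.getD i "") with
        | some t => acc ++ [t]
        | none => acc) acc)
      = fun acc page => acc ++ pageScanB (PySem.Set.ofList st) (buildPrefixes st) page := by
    funext acc page
    have hbody : (fun (acc : List String) (i : Nat) =>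
        match scanA st page page.length (i + 1) (page.getD i "") with
        | some t => acc ++ [t]
        | none => acc)
        = fun acc i => acc ++ (scanL st (page.getD i "") (page.drop (i + 1))).toList := by
      funext acc i
      rw [scanA_eq_scanL]
      cases scanL st (page.getD i "") (page.drop (i + 1)) <;> simp
    rw [hbody, PySem.List.foldl_append_eq_flatMap, pageScanB_eq]
  rw [hstep]

theorem check_section_titles_spec : Claim_equal_check_section_titles := by
  intro st bmw _
  show _ = _
  rw [check_section_titles, check_section_titles_alt]
  have hF := formatted_eq st bmw
  rw [hF]
  refine Prod.ext rfl ?_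
  simp only []
  set F := bmw.foldl (fun acc page =>
    acc ++ pageScanB (PySem.Set.ofList st) (buildPrefixes st) page) [] with hFdef
  have hstep : (fun (acc : List String) (t : String) =>
      if t ∈ F then acc else acc ++ [t])
      = fun acc t => if (!(decide (t ∈ PySem.Set.ofList F))) = true then acc ++ [t] else acc := by
    funext acc t
    by_cases h : t ∈ F
    · simp [h, PySem.Set.mem_ofList]
    · simp [h, PySem.Set.mem_ofList]
  rw [hstep, PySem.List.foldl_append_if]
  simp
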